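-- pv_equiv track=rewrite | github.com/MaxWijnbergen/Thesis_BIT_MOD12 | Python codes Thesis/Mapping/Filtering/filter_one_cwe.py | keep_most_common_cwes
-- ===== SOURCE A (Python) =====
-- def keep_most_common_cwes(article, most_common_cwes):
--     lines = article.split('\n')
--     filtered_lines = []
--     cwes_added = False
--     for line in lines:
--         if 'TTP:' in line or 'CVEs found in' in line:
--             filtered_lines.append(line)
--         elif any(cwe in line for cwe in most_common_cwes) and not cwes_added:
--             filtered_lines.extend(most_common_cwes)
--             cwes_added = True
--     return '\n'.join(filtered_lines)
-- ===== SOURCE B (Python) =====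
-- def keep_most_common_cwes(article, most_common_cwes):
--     lines = article.split('\n')
--
--     def keep(line):
--         return 'TTP:' in line or 'CVEs found in' in line
--
--     kept = [line for line in lines if keep(line)]
--     # insertion index = number of kept lines before the first non-kept line
--     # that contains one of the common CWEs; None if no such trigger line
--     idx = None
--     seen = 0
--     for line in lines:
--         if keep(line):
--             seen += 1
--         elif any(cwe in line for cwe in most_common_cwes):
--             idx = seen
--             break
--     if idx is None:
--         return '\n'.join(kept)
--     return '\n'.join(kept[:idx] + most_common_cwes + kept[idx:])
-- ===== Notes on version B (the rewrite author's own statement) =====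
-- stated objective: alternative
-- what changed: Replaces A's single interleaved pass with a stateful insert flag by a build-then-splice decomposition: filter the kept TTP/CVE lines, separately scan for the insertion index (count of kept lines before the first non-kept line containing a common CWE), then splice most_common_cwes in at that index.
import Mathlib
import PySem

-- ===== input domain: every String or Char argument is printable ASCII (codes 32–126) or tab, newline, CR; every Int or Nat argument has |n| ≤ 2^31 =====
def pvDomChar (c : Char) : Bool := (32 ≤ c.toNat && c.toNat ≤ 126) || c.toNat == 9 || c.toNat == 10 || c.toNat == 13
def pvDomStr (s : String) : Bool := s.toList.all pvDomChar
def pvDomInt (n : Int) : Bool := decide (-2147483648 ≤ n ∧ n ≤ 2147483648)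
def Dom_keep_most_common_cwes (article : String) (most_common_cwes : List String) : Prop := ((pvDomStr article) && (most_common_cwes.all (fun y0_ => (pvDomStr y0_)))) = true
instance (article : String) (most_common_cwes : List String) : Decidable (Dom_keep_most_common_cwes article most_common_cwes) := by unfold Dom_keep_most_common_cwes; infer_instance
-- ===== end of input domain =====

-- B replaces A's interleaved filter-and-insert single pass by a build-then-splice
-- decomposition: filter the kept lines, separately locate the insertion index, splice.
-- Objective: alternative decomposition (same asymptotic cost).

-- ===== PORT A =====
-- one step of A's loop over the lines; state = (filtered_lines, cwes_added)
def pvStepA (most_common_cwes : List String) (st : List String × Bool) (line : String) :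
    List String × Bool :=
  if PySem.Str.isIn "TTP:" line || PySem.Str.isIn "CVEs found in" line then
    (st.1 ++ [line], st.2)
  else if (most_common_cwes.any (fun cwe => PySem.Str.isIn cwe line)) && !st.2 then
    (st.1 ++ most_common_cwes, true)
  else
    st

def keep_most_common_cwes (article : String) (most_common_cwes : List String) : String :=
  let lines := (PySem.Str.split? article "\n").getD []
  let st := lines.foldl (pvStepA most_common_cwes) ([], false)
  PySem.Str.join "\n" st.1

-- ===== PORT B =====
def pvKeepB (line : String) : Bool :=
  PySem.Str.isIn "TTP:" line || PySem.Str.isIn "CVEs found in" line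

-- B's index-finding loop: count kept lines until the first non-kept trigger line
def pvFindIdxB (most_common_cwes : List String) : List String → Nat → Option Nat
  | [], _ => none
  | line :: rest, seen =>
    if pvKeepB line then pvFindIdxB most_common_cwes rest (seen + 1)
    else if most_common_cwes.any (fun cwe => PySem.Str.isIn cwe line) then some seen
    else pvFindIdxB most_common_cwes rest seen

def keep_most_common_cwes_alt (article : String) (most_common_cwes : List String) : String :=
  let lines := (PySem.Str.split? article "\n").getD []
  let kept := lines.filter pvKeepB
  match pvFindIdxB most_common_cwes lines 0 with
  | none => PySem.Str.join "\n" kept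
  | some i => PySem.Str.join "\n" (kept.take i ++ most_common_cwes ++ kept.drop i)

-- ===== PRECONDITION & SPEC =====
def Spec_keep_most_common_cwes (article : String) (most_common_cwes : List String) (out : String) : Prop := out = keep_most_common_cwes_alt article most_common_cwes
instance (article : String) (most_common_cwes : List String) (out : String) : Decidable (Spec_keep_most_common_cwes article most_common_cwes out) := by unfold Spec_keep_most_common_cwes; infer_instance

-- ===== CLAIM (what is proved, stated in full; the proofs are below) =====
def Claim_equal_keep_most_common_cwes : Prop := ∀ (article : String) (most_common_cwes : List String), Dom_keep_most_common_cwes article most_common_cwes → Spec_keep_most_common_cwes article most_common_cwes (keep_most_common_cwes article most_common_cwes)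

-- ===== LEMMAS AND PROOFS =====

-- A's step written through B's predicate (definitional)
theorem pvStepA_eq (mc : List String) (st : List String × Bool) (line : String) :
    pvStepA mc st line =
      if pvKeepB line then (st.1 ++ [line], st.2)
      else if (mc.any (fun cwe => PySem.Str.isIn cwe line)) && !st.2 then
        (st.1 ++ mc, true)
      else st := rfl

-- after cwes_added is set, A's loop just appends the kept lines
theorem pvFoldA_true (mc : List String) :
    ∀ (lines : List String) (acc : List String),
      (lines.foldl (pvStepA mc) (acc, true)).1 = acc ++ lines.filter pvKeepB := by
  intro lines
  induction lines with
  | nil => intro acc; simp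
  | cons l rest ih =>
    intro acc
    by_cases h : pvKeepB l
    · rw [List.foldl_cons, pvStepA_eq, if_pos h]
      simp [ih, List.filter_cons, h]
    · rw [List.foldl_cons, pvStepA_eq, if_neg (by simp [h])]
      rw [if_neg (by simp)]
      simp [ih, List.filter_cons, h]

-- B's index loop shifts with its counter
theorem pvFindIdxB_shift (mc : List String) :
    ∀ (lines : List String) (s : Nat),
      pvFindIdxB mc lines s = (pvFindIdxB mc lines 0).map (s + ·) := by
  intro lines
  induction lines with
  | nil => intro s; simp [pvFindIdxB]
  | cons l rest ih =>
    intro s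
    by_cases h : pvKeepB l
    · simp only [pvFindIdxB, h, if_pos]
      rw [ih (s + 1), ih 1]
      cases pvFindIdxB mc rest 0 <;> simp <;> omega
    · by_cases ht : mc.any (fun cwe => PySem.Str.isIn cwe l)
      · rw [pvFindIdxB, if_neg (by simp [h]), if_pos (by simpa using ht),
            pvFindIdxB, if_neg (by simp [h]), if_pos (by simpa using ht)]
        simp
      · rw [pvFindIdxB, if_neg (by simp [h]), if_neg (by simpa using ht),
            pvFindIdxB, if_neg (by simp [h]), if_neg (by simpa using ht)]
        exact ih s

-- main invariant: A's loop (not yet added) equals B's splice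
theorem pvFoldA_false (mc : List String) :
    ∀ (lines : List String) (acc : List String),
      (lines.foldl (pvStepA mc) (acc, false)).1 =
        match pvFindIdxB mc lines 0 with
        | none => acc ++ lines.filter pvKeepB
        | some i =>
            acc ++ ((lines.filter pvKeepB).take i ++ mc ++ (lines.filter pvKeepB).drop i) := by
  intro lines
  induction lines with
  | nil => intro acc; simp [pvFindIdxB]
  | cons l rest ih =>
    intro acc
    by_cases h : pvKeepB l
    · rw [List.foldl_cons, pvStepA_eq, if_pos h]
      rw [ih (acc ++ [l])]
      rw [pvFindIdxB, if_pos h, pvFindIdxB_shift mc rest 1]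
      cases pvFindIdxB mc rest 0 with
      | none => simp [List.filter_cons, h]
      | some i =>
        simp [List.filter_cons, h, Nat.add_comm 1 i, List.take_succ_cons,
              List.drop_succ_cons]
    · rw [List.foldl_cons, pvStepA_eq, if_neg (by simp [h])]
      by_cases ht : mc.any (fun cwe => PySem.Str.isIn cwe l)
      · rw [if_pos (by simpa using ht)]
        rw [pvFindIdxB, if_neg (by simp [h]), if_pos (by simpa using ht)]
        rw [pvFoldA_true mc rest (acc ++ mc)]
        simp [List.filter_cons, h]
      · rw [if_neg (by simpa using ht)]
        rw [ih acc]
        rw [pvFindIdxB, if_neg (by simp [h]), if_neg (by simpa using ht)]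
        cases pvFindIdxB mc rest 0 <;> simp [List.filter_cons, h]

-- ===== VERDICT (by name: the statement is the Claim_ definition above) =====
theorem keep_most_common_cwes_spec : Claim_equal_keep_most_common_cwes := by
  intro article mc _
  unfold Spec_keep_most_common_cwes
  simp only [keep_most_common_cwes, keep_most_common_cwes_alt]
  rw [pvFoldA_false mc ((PySem.Str.split? article "\n").getD []) []]
  cases pvFindIdxB mc ((PySem.Str.split? article "\n").getD []) 0 <;> simp
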